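-- pv_equiv track=rewrite | github.com/andreea-son/CAVA-TEMA1 | tema1.py | get_patches_from_matrix
-- ===== SOURCE A (Python) =====
-- def get_patches_from_matrix(matrix, lines_horizontal, lines_vertical):
--     patches = list()
--     patches_coords = list()
--     for i in range(len(lines_horizontal)-1):
--         for j in range(len(lines_vertical)-1):
--             if(matrix[i][j] == 1):
--                 y_min = lines_vertical[j][0][0]
--                 y_max = lines_vertical[j + 1][1][0]
--                 x_min = lines_horizontal[i][0][1]
--                 x_max = lines_horizontal[i + 1][1][1]
--                 topLeft = (x_min, y_min)
--                 topRight = (x_max, y_min)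
--                 bottomRight = (x_max, y_max)
--                 bottomLeft = (x_min, y_max)
--                 patches_coords.append((topLeft, topRight, bottomRight, bottomLeft))
--
--     for i in range(len(patches_coords)):
--         for j in range(i+1, len(patches_coords)):
--             orientation = None
--             topLeft = (-1, -1)
--             bottomRight = (-1, -1)
--             topRight = (-1, -1)
--             bottomLeft = (-1, -1)
--
--             topLeft_crt, topRight_crt, bottomRight_crt, bottomLeft_crt = patches_coords[i]
--             topLeft_next, topRight_next, bottomRight_next, bottomLeft_next = patches_coords[j]
--
--             # vertical
--             if ((topLeft_crt == bottomLeft_next and topRight_crt == bottomRight_next) or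
--                 (topLeft_next == bottomLeft_crt and topRight_next == bottomRight_crt)):
--                     topLeft = min(topLeft_crt, topLeft_next, key=lambda tuple: tuple[1])
--                     topRight = min(topRight_crt, topRight_next, key=lambda tuple: tuple[1])
--                     bottomLeft = max(bottomLeft_crt, bottomLeft_next, key=lambda tuple: tuple[1])
--                     bottomRight = max(bottomRight_crt, bottomRight_next, key=lambda tuple: tuple[1])
--                     orientation = 'v'
--
--             # orizontal
--             elif ((topLeft_crt == topRight_next and bottomLeft_crt == bottomRight_next) or
--                 (topLeft_next == topRight_crt and bottomLeft_next == bottomRight_crt)):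
--                     topLeft = min(topLeft_crt, topLeft_next, key=lambda tuple: tuple[0])
--                     bottomLeft = min(bottomLeft_crt, bottomLeft_next, key=lambda tuple: tuple[0])
--                     topRight = max(topRight_crt, topRight_next, key=lambda tuple: tuple[0])
--                     bottomRight = max(bottomRight_crt, bottomRight_next, key=lambda tuple: tuple[0])
--                     orientation = 'h'
--
--             x_min, y_min = topLeft
--             x_max, y_max = bottomRight
--
--             if x_min != -1 and x_max != -1 and y_min != -1 and y_max != -1:
--                 patches.append((x_min, x_max, y_min, y_max, orientation))
--
--     return patches
-- ===== SOURCE B (Python) =====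
-- def get_patches_from_matrix(matrix, lines_horizontal, lines_vertical):
--     rects = []
--     for i in range(len(lines_horizontal) - 1):
--         for j in range(len(lines_vertical) - 1):
--             if matrix[i][j] == 1:
--                 y_min = lines_vertical[j][0][0]
--                 y_max = lines_vertical[j + 1][1][0]
--                 x_min = lines_horizontal[i][0][1]
--                 x_max = lines_horizontal[i + 1][1][1]
--                 rects.append(((x_min, y_min), (x_max, y_min), (x_max, y_max), (x_min, y_max)))
--     # index every edge once: O(n) dict building replaces A's O(n^2) pairwise scan
--     top, bottom, left, right = {}, {}, {}, {}
--     for k, (tl, tr, br, bl) in enumerate(rects):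
--         top.setdefault((tl, tr), []).append(k)
--         bottom.setdefault((bl, br), []).append(k)
--         left.setdefault((tl, bl), []).append(k)
--         right.setdefault((tr, br), []).append(k)
--     patches = []
--     for i, (tl, tr, br, bl) in enumerate(rects):
--         vert = set(top.get((bl, br), [])) | set(bottom.get((tl, tr), []))
--         horiz = set(left.get((tr, br), [])) | set(right.get((tl, bl), []))
--         for j in sorted(vert | horiz):
--             if j <= i:
--                 continue
--             tl2, tr2, br2, bl2 = rects[j]
--             if j in vert:
--                 m_tl = tl if tl[1] <= tl2[1] else tl2
--                 m_br = br if br[1] >= br2[1] else br2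
--                 orientation = 'v'
--             else:
--                 m_tl = tl if tl[0] <= tl2[0] else tl2
--                 m_br = br if br[0] >= br2[0] else br2
--                 orientation = 'h'
--             x_min, y_min = m_tl
--             x_max, y_max = m_br
--             if x_min != -1 and x_max != -1 and y_min != -1 and y_max != -1:
--                 patches.append((x_min, x_max, y_min, y_max, orientation))
--     return patches
-- ===== Notes on version B (the rewrite author's own statement) =====
-- stated objective: alternative
-- what changed: Replaces A's all-pairs adjacency scan over the patches by four edge-keyed dictionaries built in one pass, so each patch looks up only its actual neighbours; sorting each patch's partner-index set reproduces A's output order exactly.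
import Mathlib
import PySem

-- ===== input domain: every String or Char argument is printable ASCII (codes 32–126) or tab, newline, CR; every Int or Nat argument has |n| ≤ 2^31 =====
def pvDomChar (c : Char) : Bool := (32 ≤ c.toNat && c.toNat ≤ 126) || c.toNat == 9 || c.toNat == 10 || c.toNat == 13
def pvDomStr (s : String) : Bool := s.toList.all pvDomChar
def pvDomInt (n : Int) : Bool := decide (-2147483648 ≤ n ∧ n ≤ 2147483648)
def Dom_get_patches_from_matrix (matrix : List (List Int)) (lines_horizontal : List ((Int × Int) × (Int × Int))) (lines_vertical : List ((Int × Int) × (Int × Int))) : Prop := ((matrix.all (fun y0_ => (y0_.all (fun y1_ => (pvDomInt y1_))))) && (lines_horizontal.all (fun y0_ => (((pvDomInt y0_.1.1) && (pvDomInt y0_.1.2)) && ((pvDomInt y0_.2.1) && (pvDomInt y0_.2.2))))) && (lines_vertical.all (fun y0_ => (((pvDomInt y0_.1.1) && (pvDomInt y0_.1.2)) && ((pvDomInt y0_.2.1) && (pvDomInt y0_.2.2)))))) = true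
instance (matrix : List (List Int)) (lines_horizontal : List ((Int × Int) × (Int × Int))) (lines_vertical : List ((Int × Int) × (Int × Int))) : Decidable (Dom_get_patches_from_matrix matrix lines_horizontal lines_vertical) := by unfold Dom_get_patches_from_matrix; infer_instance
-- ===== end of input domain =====

-- Alternative algorithm: B replaces A's all-pairs adjacency scan over the patches by four
-- edge-keyed dictionaries built in one pass, so each patch looks up only its actual
-- neighbours (its partner indices, sorted, reproduce A's output order exactly).

-- default rectangle used as the pyGetD placeholder (indices are always in range)
def pvD0 : (Int × Int) × (Int × Int) × (Int × Int) × (Int × Int) := ((0, 0), (0, 0), (0, 0), (0, 0))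

-- rectangles are (topLeft, topRight, bottomRight, bottomLeft); both ports build the same
-- first list exactly as the Python phase 1 loop does
def pvRects (matrix : List (List Int)) (lines_horizontal : List ((Int × Int) × (Int × Int))) (lines_vertical : List ((Int × Int) × (Int × Int))) : List ((Int × Int) × (Int × Int) × (Int × Int) × (Int × Int)) :=
  (PySem.List.pyRange 0 (PySem.List.len lines_horizontal - 1) 1).foldl (fun acc i =>
    (PySem.List.pyRange 0 (PySem.List.len lines_vertical - 1) 1).foldl (fun acc j =>
      if PySem.List.pyGetD (PySem.List.pyGetD matrix i []) j 0 == 1 then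
        let y_min := (PySem.List.pyGetD lines_vertical j ((0, 0), (0, 0))).1.1
        let y_max := (PySem.List.pyGetD lines_vertical (j + 1) ((0, 0), (0, 0))).2.1
        let x_min := (PySem.List.pyGetD lines_horizontal i ((0, 0), (0, 0))).1.2
        let x_max := (PySem.List.pyGetD lines_horizontal (i + 1) ((0, 0), (0, 0))).2.2
        acc ++ [((x_min, y_min), (x_max, y_min), (x_max, y_max), (x_min, y_max))]
      else acc) acc) []


-- B's first pass: the four edge dictionaries (top/bottom/left/right edge -> indices)
def pvQuadOf (R : List ((Int × Int) × (Int × Int) × (Int × Int) × (Int × Int))) :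
    PySem.Dict ((Int × Int) × (Int × Int)) (List Int) × PySem.Dict ((Int × Int) × (Int × Int)) (List Int) × PySem.Dict ((Int × Int) × (Int × Int)) (List Int) × PySem.Dict ((Int × Int) × (Int × Int)) (List Int) :=
  (PySem.List.enumerate R).foldl (fun st p =>
      (PySem.Dict.modify st.1 (p.2.1, p.2.2.1) [] (· ++ [p.1]),
       PySem.Dict.modify st.2.1 (p.2.2.2.2, p.2.2.2.1) [] (· ++ [p.1]),
       PySem.Dict.modify st.2.2.1 (p.2.1, p.2.2.2.2) [] (· ++ [p.1]),
       PySem.Dict.modify st.2.2.2 (p.2.2.1, p.2.2.2.1) [] (· ++ [p.1])))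
    (PySem.Dict.empty, PySem.Dict.empty, PySem.Dict.empty, PySem.Dict.empty)

-- ===== PORT A =====
def get_patches_from_matrix (matrix : List (List Int)) (lines_horizontal : List ((Int × Int) × (Int × Int))) (lines_vertical : List ((Int × Int) × (Int × Int))) : List (Int × Int × Int × Int × String) :=
  let patches_coords := pvRects matrix lines_horizontal lines_vertical
  (PySem.List.pyRange 0 (PySem.List.len patches_coords) 1).foldl (fun acc i =>
    (PySem.List.pyRange (i + 1) (PySem.List.len patches_coords) 1).foldl (fun acc j =>
      let c := PySem.List.pyGetD patches_coords i pvD0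
      let nx := PySem.List.pyGetD patches_coords j pvD0
      -- vertical
      if (c.1 == nx.2.2.2 && c.2.1 == nx.2.2.1) || (nx.1 == c.2.2.2 && nx.2.1 == c.2.2.1) then
        let topLeft := if nx.1.2 < c.1.2 then nx.1 else c.1
        let _topRight := if nx.2.1.2 < c.2.1.2 then nx.2.1 else c.2.1
        let _bottomLeft := if c.2.2.2.2 < nx.2.2.2.2 then nx.2.2.2 else c.2.2.2
        let bottomRight := if c.2.2.1.2 < nx.2.2.1.2 then nx.2.2.1 else c.2.2.1
        if topLeft.1 != -1 && bottomRight.1 != -1 && topLeft.2 != -1 && bottomRight.2 != -1 then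
          acc ++ [(topLeft.1, bottomRight.1, topLeft.2, bottomRight.2, "v")]
        else acc
      -- orizontal
      else if (c.1 == nx.2.1 && c.2.2.2 == nx.2.2.1) || (nx.1 == c.2.1 && nx.2.2.2 == c.2.2.1) then
        let topLeft := if nx.1.1 < c.1.1 then nx.1 else c.1
        let _bottomLeft := if nx.2.2.2.1 < c.2.2.2.1 then nx.2.2.2 else c.2.2.2
        let _topRight := if c.2.1.1 < nx.2.1.1 then nx.2.1 else c.2.1
        let bottomRight := if c.2.2.1.1 < nx.2.2.1.1 then nx.2.2.1 else c.2.2.1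
        if topLeft.1 != -1 && bottomRight.1 != -1 && topLeft.2 != -1 && bottomRight.2 != -1 then
          acc ++ [(topLeft.1, bottomRight.1, topLeft.2, bottomRight.2, "h")]
        else acc
      else acc) acc) []

-- ===== PORT B =====
def get_patches_from_matrix_alt (matrix : List (List Int)) (lines_horizontal : List ((Int × Int) × (Int × Int))) (lines_vertical : List ((Int × Int) × (Int × Int))) : List (Int × Int × Int × Int × String) :=
  let rects := pvRects matrix lines_horizontal lines_vertical
  -- one pass: top/bottom/left/right edge -> list of rectangle indices
  let dicts := pvQuadOf rects
  (PySem.List.enumerate rects).foldl (fun acc p =>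
    let vert : PySem.Set Int := PySem.Set.union (PySem.Set.ofList (PySem.Dict.getD dicts.1 (p.2.2.2.2, p.2.2.2.1) [])) (PySem.Set.ofList (PySem.Dict.getD dicts.2.1 (p.2.1, p.2.2.1) []))
    let horiz : PySem.Set Int := PySem.Set.union (PySem.Set.ofList (PySem.Dict.getD dicts.2.2.1 (p.2.2.1, p.2.2.2.1) [])) (PySem.Set.ofList (PySem.Dict.getD dicts.2.2.2 (p.2.1, p.2.2.2.2) []))
    (PySem.List.sorted (PySem.Set.union vert horiz) (fun x => x) false).foldl (fun acc j =>
      if j ≤ p.1 then acc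
      else
        let s := PySem.List.pyGetD rects j pvD0
        if PySem.Set.contains vert j then
          let m_tl := if p.2.1.2 ≤ s.1.2 then p.2.1 else s.1
          let m_br := if s.2.2.1.2 ≤ p.2.2.2.1.2 then p.2.2.2.1 else s.2.2.1
          if m_tl.1 != -1 && m_br.1 != -1 && m_tl.2 != -1 && m_br.2 != -1 then
            acc ++ [(m_tl.1, m_br.1, m_tl.2, m_br.2, "v")]
          else acc
        else
          let m_tl := if p.2.1.1 ≤ s.1.1 then p.2.1 else s.1
          let m_br := if s.2.2.1.1 ≤ p.2.2.2.1.1 then p.2.2.2.1 else s.2.2.1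
          if m_tl.1 != -1 && m_br.1 != -1 && m_tl.2 != -1 && m_br.2 != -1 then
            acc ++ [(m_tl.1, m_br.1, m_tl.2, m_br.2, "h")]
          else acc) acc) []

-- ===== PRECONDITION & SPEC =====
-- Pre_ excludes exactly the inputs where the Python A raises IndexError: the matrix must
-- cover every cell (i, j) with i < len(lines_horizontal)-1 and j < len(lines_vertical)-1
-- that the double loop reads (no cell is read when len(lines_vertical) ≤ 1).
def Pre_get_patches_from_matrix (matrix : List (List Int)) (lines_horizontal : List ((Int × Int) × (Int × Int))) (lines_vertical : List ((Int × Int) × (Int × Int))) : Prop :=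
  lines_vertical.length ≤ 1 ∨
    (lines_horizontal.length - 1 ≤ matrix.length ∧
      ∀ row ∈ matrix.take (lines_horizontal.length - 1), lines_vertical.length - 1 ≤ row.length)
instance (matrix : List (List Int)) (lines_horizontal : List ((Int × Int) × (Int × Int))) (lines_vertical : List ((Int × Int) × (Int × Int))) : Decidable (Pre_get_patches_from_matrix matrix lines_horizontal lines_vertical) := by unfold Pre_get_patches_from_matrix; infer_instance

def pvWitness_get_patches_from_matrix : List (List Int) × (List ((Int × Int) × (Int × Int))) × (List ((Int × Int) × (Int × Int))) :=
  ([[1]], [((0, 0), (0, 1)), ((0, 2), (0, 3))], [((0, 0), (1, 0)), ((2, 0), (3, 0))])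

def Spec_get_patches_from_matrix (matrix : List (List Int)) (lines_horizontal : List ((Int × Int) × (Int × Int))) (lines_vertical : List ((Int × Int) × (Int × Int))) (out : List (Int × Int × Int × Int × String)) : Prop := out = get_patches_from_matrix_alt matrix lines_horizontal lines_vertical
instance (matrix : List (List Int)) (lines_horizontal : List ((Int × Int) × (Int × Int))) (lines_vertical : List ((Int × Int) × (Int × Int))) (out : List (Int × Int × Int × Int × String)) : Decidable (Spec_get_patches_from_matrix matrix lines_horizontal lines_vertical out) := by unfold Spec_get_patches_from_matrix; infer_instance

-- ===== CLAIM (what is proved, stated in full; the proofs are below) =====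
def Claim_equal_get_patches_from_matrix : Prop := ∀ (matrix : List (List Int)) (lines_horizontal : List ((Int × Int) × (Int × Int))) (lines_vertical : List ((Int × Int) × (Int × Int))), Dom_get_patches_from_matrix matrix lines_horizontal lines_vertical → Pre_get_patches_from_matrix matrix lines_horizontal lines_vertical → Spec_get_patches_from_matrix matrix lines_horizontal lines_vertical (get_patches_from_matrix matrix lines_horizontal lines_vertical)

-- ===== LEMMAS AND PROOFS =====

-- the per-pair emitted segment, exactly as A computes it
def pvEmitV (c nx : (Int × Int) × (Int × Int) × (Int × Int) × (Int × Int)) : List (Int × Int × Int × Int × String) :=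
  let topLeft := if nx.1.2 < c.1.2 then nx.1 else c.1
  let bottomRight := if c.2.2.1.2 < nx.2.2.1.2 then nx.2.2.1 else c.2.2.1
  if topLeft.1 != -1 && bottomRight.1 != -1 && topLeft.2 != -1 && bottomRight.2 != -1 then
    [(topLeft.1, bottomRight.1, topLeft.2, bottomRight.2, "v")]
  else []

def pvEmitH (c nx : (Int × Int) × (Int × Int) × (Int × Int) × (Int × Int)) : List (Int × Int × Int × Int × String) :=
  let topLeft := if nx.1.1 < c.1.1 then nx.1 else c.1
  let bottomRight := if c.2.2.1.1 < nx.2.2.1.1 then nx.2.2.1 else c.2.2.1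
  if topLeft.1 != -1 && bottomRight.1 != -1 && topLeft.2 != -1 && bottomRight.2 != -1 then
    [(topLeft.1, bottomRight.1, topLeft.2, bottomRight.2, "h")]
  else []

def pvVC (c nx : (Int × Int) × (Int × Int) × (Int × Int) × (Int × Int)) : Bool :=
  (c.1 == nx.2.2.2 && c.2.1 == nx.2.2.1) || (nx.1 == c.2.2.2 && nx.2.1 == c.2.2.1)
def pvHC (c nx : (Int × Int) × (Int × Int) × (Int × Int) × (Int × Int)) : Bool :=
  (c.1 == nx.2.1 && c.2.2.2 == nx.2.2.1) || (nx.1 == c.2.1 && nx.2.2.2 == c.2.2.1)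

def pvBody (c nx : (Int × Int) × (Int × Int) × (Int × Int) × (Int × Int)) : List (Int × Int × Int × Int × String) :=
  if pvVC c nx then pvEmitV c nx else if pvHC c nx then pvEmitH c nx else []

-- B's candidate sets, sorted partner list and inner-loop body for the rectangle r = R[i]
def pvVertOf (R : List ((Int × Int) × (Int × Int) × (Int × Int) × (Int × Int))) (r : (Int × Int) × (Int × Int) × (Int × Int) × (Int × Int)) : PySem.Set Int :=
  PySem.Set.union (PySem.Set.ofList ((pvQuadOf R).1.getD (r.2.2.2, r.2.2.1) [])) (PySem.Set.ofList ((pvQuadOf R).2.1.getD (r.1, r.2.1) []))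
def pvHorizOf (R : List ((Int × Int) × (Int × Int) × (Int × Int) × (Int × Int))) (r : (Int × Int) × (Int × Int) × (Int × Int) × (Int × Int)) : PySem.Set Int :=
  PySem.Set.union (PySem.Set.ofList ((pvQuadOf R).2.2.1.getD (r.2.1, r.2.2.1) [])) (PySem.Set.ofList ((pvQuadOf R).2.2.2.getD (r.1, r.2.2.2) []))
def pvSortedOf (R : List ((Int × Int) × (Int × Int) × (Int × Int) × (Int × Int))) (r : (Int × Int) × (Int × Int) × (Int × Int) × (Int × Int)) : List Int :=
  PySem.List.sorted (PySem.Set.union (pvVertOf R r) (pvHorizOf R r)) (fun x => x) false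

def pvInnerB (R : List ((Int × Int) × (Int × Int) × (Int × Int) × (Int × Int))) (i : Int) (r : (Int × Int) × (Int × Int) × (Int × Int) × (Int × Int)) (j : Int) : List (Int × Int × Int × Int × String) :=
  if j ≤ i then []
  else
    let s := PySem.List.pyGetD R j pvD0
    if PySem.Set.contains (pvVertOf R r) j then
      let m_tl := if r.1.2 ≤ s.1.2 then r.1 else s.1
      let m_br := if s.2.2.1.2 ≤ r.2.2.1.2 then r.2.2.1 else s.2.2.1
      if m_tl.1 != -1 && m_br.1 != -1 && m_tl.2 != -1 && m_br.2 != -1 then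
        [(m_tl.1, m_br.1, m_tl.2, m_br.2, "v")]
      else []
    else
      let m_tl := if r.1.1 ≤ s.1.1 then r.1 else s.1
      let m_br := if s.2.2.1.1 ≤ r.2.2.1.1 then r.2.2.1 else s.2.2.1
      if m_tl.1 != -1 && m_br.1 != -1 && m_tl.2 != -1 && m_br.2 != -1 then
        [(m_tl.1, m_br.1, m_tl.2, m_br.2, "h")]
      else []

-- generic list facts about the shape of these two loops
theorem pvFlatMap_congr {α β : Type} {l : List α} {f g : α → List β}
    (h : ∀ x ∈ l, f x = g x) : l.flatMap f = l.flatMap g := by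
  induction l with
  | nil => rfl
  | cons x t ih =>
    simp only [List.flatMap_cons]
    rw [h x (by simp), ih (fun y hy => h y (by simp [hy]))]

theorem pvFlatMap_filter {α β : Type} (l : List α) (p : α → Bool) (f : α → List β)
    (h : ∀ x ∈ l, p x = false → f x = []) : l.flatMap f = (l.filter p).flatMap f := by
  induction l with
  | nil => rfl
  | cons x t ih =>
    by_cases hx : p x = true
    · simp only [List.filter_cons, hx, if_pos, List.flatMap_cons]
      rw [ih (fun y hy hf => h y (by simp [hy]) hf)]
    · have hfx : f x = [] := h x (by simp) (by simpa using hx)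
      simp only [List.filter_cons, List.flatMap_cons, hfx, List.nil_append]
      simp only [Bool.not_eq_true] at hx
      simp only [hx, Bool.false_eq_true, if_false]
      exact ih (fun y hy hf => h y (by simp [hy]) hf)

theorem pvEq_of_sorted {l₁ l₂ : List Int}
    (h1 : l₁.Pairwise (· < ·)) (h2 : l₂.Pairwise (· < ·))
    (hm : ∀ x, x ∈ l₁ ↔ x ∈ l₂) : l₁ = l₂ := by
  have n1 : l₁.Nodup := h1.imp (fun h => ne_of_lt h)
  have n2 : l₂.Nodup := h2.imp (fun h => ne_of_lt h)
  exact PySem.List.eq_of_perm_of_pairwise_le_of_injective (fun x => x) Function.injective_id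
    ((List.perm_ext_iff_of_nodup n1 n2).mpr hm)
    (h1.imp (fun h => le_of_lt h)) (h2.imp (fun h => le_of_lt h))

theorem pvIfFlip {α : Type} (a b : α) (s t : Int) :
    (if s ≤ t then a else b) = (if t < s then b else a) := by
  split_ifs <;> first | rfl | (exfalso; omega)

-- one edge dictionary is a filtered index range
theorem pvFold_getD (R : List ((Int × Int) × (Int × Int) × (Int × Int) × (Int × Int)))
    (key : (Int × Int) × (Int × Int) × (Int × Int) × (Int × Int) → (Int × Int) × (Int × Int))
    (e : (Int × Int) × (Int × Int)) :
    ((PySem.List.enumerate R).foldl (fun d p => PySem.Dict.modify d (key p.2) [] (· ++ [p.1])) PySem.Dict.empty).getD e []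
      = (PySem.List.pyRange 0 (PySem.List.len R) 1).filter (fun j => key (PySem.List.pyGetD R j pvD0) == e) := by
  have h := PySem.Dict.getD_foldl_modify_append ((PySem.List.enumerate R).map (fun p => (key p.2, p.1))) PySem.Dict.empty e
  simp only [List.foldl_map] at h
  rw [h]
  rw [PySem.List.enumerate_eq_map_pyRange R pvD0]
  simp [List.filter_map, List.map_map, Function.comp_def]

theorem pvQuadOf_eq (R : List ((Int × Int) × (Int × Int) × (Int × Int) × (Int × Int))) :
    pvQuadOf R = ((PySem.List.enumerate R).foldl (fun d p => PySem.Dict.modify d (p.2.1, p.2.2.1) [] (· ++ [p.1])) PySem.Dict.empty,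
      (PySem.List.enumerate R).foldl (fun d p => PySem.Dict.modify d (p.2.2.2.2, p.2.2.2.1) [] (· ++ [p.1])) PySem.Dict.empty,
      (PySem.List.enumerate R).foldl (fun d p => PySem.Dict.modify d (p.2.1, p.2.2.2.2) [] (· ++ [p.1])) PySem.Dict.empty,
      (PySem.List.enumerate R).foldl (fun d p => PySem.Dict.modify d (p.2.2.1, p.2.2.2.1) [] (· ++ [p.1])) PySem.Dict.empty) := by
  unfold pvQuadOf
  rw [PySem.List.foldl_prod_mk
        (fun d (p : Int × ((Int × Int) × (Int × Int) × (Int × Int) × (Int × Int))) => PySem.Dict.modify d (p.2.1, p.2.2.1) [] (· ++ [p.1]))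
        (fun st p =>
          (PySem.Dict.modify st.1 (p.2.2.2.2, p.2.2.2.1) [] (· ++ [p.1]),
           PySem.Dict.modify st.2.1 (p.2.1, p.2.2.2.2) [] (· ++ [p.1]),
           PySem.Dict.modify st.2.2 (p.2.2.1, p.2.2.2.1) [] (· ++ [p.1]))),
      PySem.List.foldl_prod_mk
        (fun d (p : Int × ((Int × Int) × (Int × Int) × (Int × Int) × (Int × Int))) => PySem.Dict.modify d (p.2.2.2.2, p.2.2.2.1) [] (· ++ [p.1]))
        (fun st p =>
          (PySem.Dict.modify st.1 (p.2.1, p.2.2.2.2) [] (· ++ [p.1]),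
           PySem.Dict.modify st.2 (p.2.2.1, p.2.2.2.1) [] (· ++ [p.1]))),
      PySem.List.foldl_prod_mk
        (fun d (p : Int × ((Int × Int) × (Int × Int) × (Int × Int) × (Int × Int))) => PySem.Dict.modify d (p.2.1, p.2.2.2.2) [] (· ++ [p.1]))
        (fun d p => PySem.Dict.modify d (p.2.2.1, p.2.2.2.1) [] (· ++ [p.1]))]

theorem pvQuadOf_getD_1 (R : List ((Int × Int) × (Int × Int) × (Int × Int) × (Int × Int))) (e : (Int × Int) × (Int × Int)) :
    (pvQuadOf R).1.getD e [] = (PySem.List.pyRange 0 (PySem.List.len R) 1).filter (fun j => ((PySem.List.pyGetD R j pvD0).1, (PySem.List.pyGetD R j pvD0).2.1) == e) := by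
  rw [pvQuadOf_eq]; exact pvFold_getD R (fun r => (r.1, r.2.1)) e

theorem pvQuadOf_getD_2 (R : List ((Int × Int) × (Int × Int) × (Int × Int) × (Int × Int))) (e : (Int × Int) × (Int × Int)) :
    (pvQuadOf R).2.1.getD e [] = (PySem.List.pyRange 0 (PySem.List.len R) 1).filter (fun j => ((PySem.List.pyGetD R j pvD0).2.2.2, (PySem.List.pyGetD R j pvD0).2.2.1) == e) := by
  rw [pvQuadOf_eq]; exact pvFold_getD R (fun r => (r.2.2.2, r.2.2.1)) e

theorem pvQuadOf_getD_3 (R : List ((Int × Int) × (Int × Int) × (Int × Int) × (Int × Int))) (e : (Int × Int) × (Int × Int)) :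
    (pvQuadOf R).2.2.1.getD e [] = (PySem.List.pyRange 0 (PySem.List.len R) 1).filter (fun j => ((PySem.List.pyGetD R j pvD0).1, (PySem.List.pyGetD R j pvD0).2.2.2) == e) := by
  rw [pvQuadOf_eq]; exact pvFold_getD R (fun r => (r.1, r.2.2.2)) e

theorem pvQuadOf_getD_4 (R : List ((Int × Int) × (Int × Int) × (Int × Int) × (Int × Int))) (e : (Int × Int) × (Int × Int)) :
    (pvQuadOf R).2.2.2.getD e [] = (PySem.List.pyRange 0 (PySem.List.len R) 1).filter (fun j => ((PySem.List.pyGetD R j pvD0).2.1, (PySem.List.pyGetD R j pvD0).2.2.1) == e) := by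
  rw [pvQuadOf_eq]; exact pvFold_getD R (fun r => (r.2.1, r.2.2.1)) e

theorem pvMem_vertOf (R : List ((Int × Int) × (Int × Int) × (Int × Int) × (Int × Int))) (r : (Int × Int) × (Int × Int) × (Int × Int) × (Int × Int)) (j : Int) :
    j ∈ pvVertOf R r ↔ 0 ≤ j ∧ j < PySem.List.len R ∧ pvVC r (PySem.List.pyGetD R j pvD0) = true := by
  unfold pvVertOf
  rw [PySem.Set.mem_union, PySem.Set.mem_ofList, PySem.Set.mem_ofList, pvQuadOf_getD_1, pvQuadOf_getD_2]
  simp only [List.mem_filter, PySem.List.mem_pyRange_one, pvVC, beq_iff_eq, Prod.mk.injEq,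
    Bool.or_eq_true, Bool.and_eq_true]
  constructor
  · rintro (⟨⟨h0, h1⟩, h2, h3⟩ | ⟨⟨h0, h1⟩, h2, h3⟩)
    · exact ⟨h0, h1, Or.inr ⟨h2, h3⟩⟩
    · exact ⟨h0, h1, Or.inl ⟨h2.symm, h3.symm⟩⟩
  · rintro ⟨h0, h1, (⟨h2, h3⟩ | ⟨h2, h3⟩)⟩
    · exact Or.inr ⟨⟨h0, h1⟩, h2.symm, h3.symm⟩
    · exact Or.inl ⟨⟨h0, h1⟩, h2, h3⟩

theorem pvMem_horizOf (R : List ((Int × Int) × (Int × Int) × (Int × Int) × (Int × Int))) (r : (Int × Int) × (Int × Int) × (Int × Int) × (Int × Int)) (j : Int) :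
    j ∈ pvHorizOf R r ↔ 0 ≤ j ∧ j < PySem.List.len R ∧ pvHC r (PySem.List.pyGetD R j pvD0) = true := by
  unfold pvHorizOf
  rw [PySem.Set.mem_union, PySem.Set.mem_ofList, PySem.Set.mem_ofList, pvQuadOf_getD_3, pvQuadOf_getD_4]
  simp only [List.mem_filter, PySem.List.mem_pyRange_one, pvHC, beq_iff_eq, Prod.mk.injEq,
    Bool.or_eq_true, Bool.and_eq_true]
  constructor
  · rintro (⟨⟨h0, h1⟩, h2, h3⟩ | ⟨⟨h0, h1⟩, h2, h3⟩)
    · exact ⟨h0, h1, Or.inr ⟨h2, h3⟩⟩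
    · exact ⟨h0, h1, Or.inl ⟨h2.symm, h3.symm⟩⟩
  · rintro ⟨h0, h1, (⟨h2, h3⟩ | ⟨h2, h3⟩)⟩
    · exact Or.inr ⟨⟨h0, h1⟩, h2.symm, h3.symm⟩
    · exact Or.inl ⟨⟨h0, h1⟩, h2, h3⟩

theorem pvNodup_sortedOf (R : List ((Int × Int) × (Int × Int) × (Int × Int) × (Int × Int))) (r : (Int × Int) × (Int × Int) × (Int × Int) × (Int × Int)) :
    (pvSortedOf R r).Nodup := by
  unfold pvSortedOf
  exact (PySem.List.sorted_perm _ _ _).nodup_iff.mpr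
    (PySem.Set.nodup_union _ _ (PySem.Set.nodup_union _ _ (PySem.Set.nodup_ofList _)))

theorem pvPairwise_sortedOf (R : List ((Int × Int) × (Int × Int) × (Int × Int) × (Int × Int))) (r : (Int × Int) × (Int × Int) × (Int × Int) × (Int × Int)) :
    (pvSortedOf R r).Pairwise (· < ·) := by
  have hle := PySem.List.sorted_pairwise (PySem.Set.union (pvVertOf R r) (pvHorizOf R r)) (fun x => x)
  have hnd := pvNodup_sortedOf R r
  exact (hle.and hnd).imp (fun h => lt_of_le_of_ne h.1 h.2)

theorem pvMem_sortedOf (R : List ((Int × Int) × (Int × Int) × (Int × Int) × (Int × Int))) (r : (Int × Int) × (Int × Int) × (Int × Int) × (Int × Int)) (j : Int) :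
    j ∈ pvSortedOf R r ↔ 0 ≤ j ∧ j < PySem.List.len R ∧ (pvVC r (PySem.List.pyGetD R j pvD0) || pvHC r (PySem.List.pyGetD R j pvD0)) = true := by
  unfold pvSortedOf
  rw [PySem.List.mem_sorted, PySem.Set.mem_union, pvMem_vertOf, pvMem_horizOf]
  simp only [Bool.or_eq_true]
  tauto

-- the per-index inner loops agree
theorem pvInner_eq (R : List ((Int × Int) × (Int × Int) × (Int × Int) × (Int × Int))) (i : Int) (h0 : 0 ≤ i) :
    (pvSortedOf R (PySem.List.pyGetD R i pvD0)).flatMap (pvInnerB R i (PySem.List.pyGetD R i pvD0))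
      = (PySem.List.pyRange (i + 1) (PySem.List.len R) 1).flatMap
          (fun j => pvBody (PySem.List.pyGetD R i pvD0) (PySem.List.pyGetD R j pvD0)) := by
  set r := PySem.List.pyGetD R i pvD0 with hr
  rw [pvFlatMap_filter (pvSortedOf R r) (fun j => decide (i < j)) _
        (by intro j _ hj; simp only [decide_eq_false_iff_not, not_lt] at hj
            simp [pvInnerB, hj])]
  rw [pvFlatMap_filter (PySem.List.pyRange (i + 1) (PySem.List.len R) 1)
        (fun j => pvVC r (PySem.List.pyGetD R j pvD0) || pvHC r (PySem.List.pyGetD R j pvD0)) _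
        (by intro j _ hj
            simp only [Bool.or_eq_false_iff] at hj
            simp [pvBody, hj.1, hj.2])]
  have hlists : (pvSortedOf R r).filter (fun j => decide (i < j))
      = (PySem.List.pyRange (i + 1) (PySem.List.len R) 1).filter
          (fun j => pvVC r (PySem.List.pyGetD R j pvD0) || pvHC r (PySem.List.pyGetD R j pvD0)) := by
    apply pvEq_of_sorted
    · exact (pvPairwise_sortedOf R r).filter _
    · exact (PySem.List.pairwise_lt_pyRange_one _ _).filter _
    · intro x
      simp only [List.mem_filter, pvMem_sortedOf, PySem.List.mem_pyRange_one, decide_eq_true_eq]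
      constructor
      · rintro ⟨⟨hx0, hxn, hc⟩, hxi⟩; exact ⟨⟨by omega, hxn⟩, hc⟩
      · rintro ⟨⟨hxi, hxn⟩, hc⟩; exact ⟨⟨by omega, hxn, hc⟩, by omega⟩
  rw [hlists]
  apply pvFlatMap_congr
  intro j hj
  have hj' := hj
  rw [← hlists] at hj'
  simp only [List.mem_filter, pvMem_sortedOf, decide_eq_true_eq] at hj'
  obtain ⟨⟨hj0, hjn, hc⟩, hij⟩ := hj'
  have hnotle : ¬ j ≤ i := by omega
  by_cases hv : pvVC r (PySem.List.pyGetD R j pvD0) = true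
  · have hcont : PySem.Set.contains (pvVertOf R r) j = true :=
      (PySem.Set.contains_iff _ _).mpr ((pvMem_vertOf R r j).mpr ⟨hj0, hjn, hv⟩)
    simp only [pvInnerB, hnotle, if_false, hcont, if_true, pvBody, hv, pvEmitV]
    rw [pvIfFlip (r.1) ((PySem.List.pyGetD R j pvD0).1) (r.1.2) ((PySem.List.pyGetD R j pvD0).1.2)]
    rw [pvIfFlip (r.2.2.1) ((PySem.List.pyGetD R j pvD0).2.2.1) ((PySem.List.pyGetD R j pvD0).2.2.1.2) (r.2.2.1.2)]
  · have hcont : PySem.Set.contains (pvVertOf R r) j = false := by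
      rw [← Bool.not_eq_true, PySem.Set.contains_iff]
      intro hmem
      exact hv ((pvMem_vertOf R r j).mp hmem).2.2
    have hh : pvHC r (PySem.List.pyGetD R j pvD0) = true := by
      rcases Bool.or_eq_true_iff.mp hc with h | h
      · exact absurd h hv
      · exact h
    simp only [pvInnerB, hnotle, if_false, hcont, Bool.false_eq_true, pvBody, hv, hh, if_true, pvEmitH]
    rw [pvIfFlip (r.1) ((PySem.List.pyGetD R j pvD0).1) (r.1.1) ((PySem.List.pyGetD R j pvD0).1.1)]
    rw [pvIfFlip (r.2.2.1) ((PySem.List.pyGetD R j pvD0).2.2.1) ((PySem.List.pyGetD R j pvD0).2.2.1.1) (r.2.2.1.1)]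

-- A's phase 2 as a double flatMap
theorem pvA_eq (matrix : List (List Int)) (lines_horizontal : List ((Int × Int) × (Int × Int))) (lines_vertical : List ((Int × Int) × (Int × Int))) :
    get_patches_from_matrix matrix lines_horizontal lines_vertical
      = (PySem.List.pyRange 0 (PySem.List.len (pvRects matrix lines_horizontal lines_vertical)) 1).flatMap
          (fun i => (PySem.List.pyRange (i + 1) (PySem.List.len (pvRects matrix lines_horizontal lines_vertical)) 1).flatMap
            (fun j => pvBody (PySem.List.pyGetD (pvRects matrix lines_horizontal lines_vertical) i pvD0)
                             (PySem.List.pyGetD (pvRects matrix lines_horizontal lines_vertical) j pvD0))) := by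
  simp only [get_patches_from_matrix]
  generalize pvRects matrix lines_horizontal lines_vertical = R
  rw [PySem.List.foldl_congr_mem _ _
        (fun acc i => acc ++ (PySem.List.pyRange (i + 1) (PySem.List.len R) 1).flatMap
          (fun j => pvBody (PySem.List.pyGetD R i pvD0) (PySem.List.pyGetD R j pvD0))) _
        (by intro acc i _
            rw [PySem.List.foldl_congr_mem _ _
                  (fun acc j => acc ++ pvBody (PySem.List.pyGetD R i pvD0) (PySem.List.pyGetD R j pvD0)) _
                  (by intro acc2 j _
                      simp only [pvBody, pvEmitV, pvEmitH, pvVC, pvHC]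
                      split_ifs <;> simp)]
            exact PySem.List.foldl_append_eq_flatMap _ _ _)]
  exact PySem.List.foldl_append_eq_flatMap _ _ _

-- B's phase 2 as a flatMap over the enumeration
theorem pvB_eq (matrix : List (List Int)) (lines_horizontal : List ((Int × Int) × (Int × Int))) (lines_vertical : List ((Int × Int) × (Int × Int))) :
    get_patches_from_matrix_alt matrix lines_horizontal lines_vertical
      = (PySem.List.enumerate (pvRects matrix lines_horizontal lines_vertical)).flatMap
          (fun p => (pvSortedOf (pvRects matrix lines_horizontal lines_vertical) p.2).flatMap
            (pvInnerB (pvRects matrix lines_horizontal lines_vertical) p.1 p.2)) := by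
  simp only [get_patches_from_matrix_alt]
  generalize pvRects matrix lines_horizontal lines_vertical = R
  rw [PySem.List.foldl_congr_mem _ _
        (fun acc p => acc ++ (pvSortedOf R p.2).flatMap (pvInnerB R p.1 p.2)) _
        (by intro acc p _
            rw [PySem.List.foldl_congr_mem _ _ (fun acc j => acc ++ pvInnerB R p.1 p.2 j) _
                  (by intro acc2 j _
                      simp only [pvInnerB, pvVertOf]
                      split_ifs <;> simp)]
            exact PySem.List.foldl_append_eq_flatMap _ _ _)]
  exact PySem.List.foldl_append_eq_flatMap _ _ _

theorem pvPorts_eq (matrix : List (List Int)) (lines_horizontal : List ((Int × Int) × (Int × Int))) (lines_vertical : List ((Int × Int) × (Int × Int))) :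
    get_patches_from_matrix matrix lines_horizontal lines_vertical
      = get_patches_from_matrix_alt matrix lines_horizontal lines_vertical := by
  rw [pvA_eq, pvB_eq]
  generalize pvRects matrix lines_horizontal lines_vertical = R
  rw [PySem.List.enumerate_eq_map_pyRange R pvD0, List.flatMap_map]
  apply pvFlatMap_congr
  intro i hi
  rw [PySem.List.mem_pyRange_one] at hi
  exact (pvInner_eq R i hi.1).symm

-- ===== VERDICT (by name: the statement is the Claim_ definition above) =====
theorem get_patches_from_matrix_spec : Claim_equal_get_patches_from_matrix := by
  intro matrix lines_horizontal lines_vertical _ _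
  show get_patches_from_matrix matrix lines_horizontal lines_vertical
      = get_patches_from_matrix_alt matrix lines_horizontal lines_vertical
  exact pvPorts_eq matrix lines_horizontal lines_vertical
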